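-- pv_equiv track=rewrite | github.com/cedricholz/Twitter-Crypto-Signal-Binance-Bot | utils.py | get_coin_name_in_text
-- ===== SOURCE A (Python) =====
-- def get_coin_name_in_text(status_text, ignored_coins, binance_coins):
--     lower_status = status_text.lower()
--     for symbol in binance_coins:
--         pound_symbol_coin = "#" + symbol
--         dollar_symbol_coin = "$" + symbol
--
--         if symbol not in ignored_coins and (pound_symbol_coin in lower_status or dollar_symbol_coin in lower_status):
--             return symbol
--     return None
-- ===== SOURCE B (Python) =====
-- def get_coin_name_in_text(status_text, ignored_coins, binance_coins):
--     lower_status = status_text.lower()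
--     max_len = 0
--     for symbol in binance_coins:
--         if len(symbol) > max_len:
--             max_len = len(symbol)
--     candidates = set()
--     for i, ch in enumerate(lower_status):
--         if ch == '#' or ch == '$':
--             for length in range(max_len + 1):
--                 candidates.add(lower_status[i + 1:i + 1 + length])
--     ignored = set(ignored_coins)
--     for symbol in binance_coins:
--         if symbol not in ignored and symbol in candidates:
--             return symbol
--     return None
-- ===== Notes on version B (the rewrite author's own statement) =====
-- stated objective: faster
-- what changed: Instead of searching the whole lowered text for '#'+symbol / '$'+symbol once per coin, B scans the text once, collects at every '#'/'$' position the following prefixes up to the longest coin length into a hash set, and then answers each coin with one set lookup.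
import Mathlib
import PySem

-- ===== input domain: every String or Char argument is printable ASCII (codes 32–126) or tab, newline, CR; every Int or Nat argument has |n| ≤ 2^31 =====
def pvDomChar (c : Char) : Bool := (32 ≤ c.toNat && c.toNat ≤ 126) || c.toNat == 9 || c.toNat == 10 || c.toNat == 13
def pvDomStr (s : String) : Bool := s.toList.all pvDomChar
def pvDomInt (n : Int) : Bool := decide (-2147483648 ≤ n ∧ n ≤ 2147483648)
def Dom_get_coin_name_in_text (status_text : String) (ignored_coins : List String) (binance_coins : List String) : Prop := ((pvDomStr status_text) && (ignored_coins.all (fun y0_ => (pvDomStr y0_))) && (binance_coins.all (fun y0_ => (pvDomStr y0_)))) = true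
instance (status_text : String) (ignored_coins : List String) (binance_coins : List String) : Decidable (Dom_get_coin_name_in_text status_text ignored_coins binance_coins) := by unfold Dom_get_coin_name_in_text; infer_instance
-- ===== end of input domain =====

-- B replaces A's per-coin substring scans of the whole text (O(coins·len(text)))
-- by one pass over the text that collects, at each '#'/'$' position, the following
-- prefixes (up to the longest coin length) into a hash set, then one pass over the
-- coin list; same return value everywhere.

-- ===== PORT A =====
-- the loop 'for symbol in binance_coins: …' ("#"+symbol is written String.ofList ('#' :: symbol.toList))
def pvLoopA (ignored_coins : List String) (lower_status : String) : List String → Option String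
  | [] => none
  | symbol :: rest =>
    if !(ignored_coins.contains symbol)
        && (PySem.Str.isIn (String.ofList ('#' :: symbol.toList)) lower_status
            || PySem.Str.isIn (String.ofList ('$' :: symbol.toList)) lower_status)
    then some symbol
    else pvLoopA ignored_coins lower_status rest

def get_coin_name_in_text (status_text : String) (ignored_coins : List String) (binance_coins : List String) : Option String :=
  let lower_status := PySem.Str.lower status_text
  pvLoopA ignored_coins lower_status binance_coins

-- ===== PORT B =====
-- max_len loop of Source B
def pvMaxLen (binance_coins : List String) : Int :=
  binance_coins.foldl (fun m s => if PySem.Str.len s > m then PySem.Str.len s else m) 0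

-- inner loop of Source B: 'for length in range(max_len + 1): candidates.add(lower_status[i+1 : i+1+length])'
def pvAddSlices (cs : List Char) (i : Int) (max_len : Int) (candidates : PySem.Set String) : PySem.Set String :=
  (PySem.List.pyRange 0 (max_len + 1)).foldl
    (fun a length => PySem.Set.add a (String.ofList (PySem.List.slice cs (some (i + 1)) (some (i + 1 + length))))) candidates

-- outer loop of Source B: 'for i, ch in enumerate(lower_status): if ch == '#' or ch == '$': …'
def pvCands (cs : List Char) (max_len : Int) : PySem.Set String :=
  (PySem.List.enumerate cs 0).foldl
    (fun a p => if p.2 == '#' || p.2 == '$' then pvAddSlices cs p.1 max_len a else a) PySem.Set.empty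

-- final loop of Source B
def pvLoopB (ignored candidates : PySem.Set String) : List String → Option String
  | [] => none
  | symbol :: rest =>
    if !(PySem.Set.contains ignored symbol) && PySem.Set.contains candidates symbol
    then some symbol
    else pvLoopB ignored candidates rest

def get_coin_name_in_text_alt (status_text : String) (ignored_coins : List String) (binance_coins : List String) : Option String :=
  let lower_status := PySem.Str.lower status_text
  let max_len := pvMaxLen binance_coins
  let candidates := pvCands lower_status.toList max_len
  let ignored := PySem.Set.ofList ignored_coins
  pvLoopB ignored candidates binance_coins

-- ===== PRECONDITION & SPEC =====
def Spec_get_coin_name_in_text (status_text : String) (ignored_coins : List String) (binance_coins : List String) (out : Option String) : Prop := out = get_coin_name_in_text_alt status_text ignored_coins binance_coins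
instance (status_text : String) (ignored_coins : List String) (binance_coins : List String) (out : Option String) : Decidable (Spec_get_coin_name_in_text status_text ignored_coins binance_coins out) := by unfold Spec_get_coin_name_in_text; infer_instance

-- ===== CLAIM (what is proved, stated in full; the proofs are below) =====
def Claim_equal_get_coin_name_in_text : Prop := ∀ (status_text : String) (ignored_coins : List String) (binance_coins : List String), Dom_get_coin_name_in_text status_text ignored_coins binance_coins → Spec_get_coin_name_in_text status_text ignored_coins binance_coins (get_coin_name_in_text status_text ignored_coins binance_coins)

-- ===== LEMMAS AND PROOFS =====

-- every coin length is bounded by pvMaxLen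
lemma len_le_pvMaxLen (bc : List String) : ∀ s ∈ bc, PySem.Str.len s ≤ pvMaxLen bc := by
  have hmax : pvMaxLen bc = (bc.map PySem.Str.len).foldl max 0 := by
    rw [List.foldl_map]
    unfold pvMaxLen
    congr 1
    funext m s
    split_ifs with h <;> omega
  intro s hs
  rw [hmax]
  exact (PySem.List.le_foldl_max _ _).2 _ (List.mem_map_of_mem hs)

-- membership in the inner fold of Set.add
lemma mem_pvAddSlices (cs : List Char) (i max_len : Int) (a : PySem.Set String) (x : String) :
    x ∈ pvAddSlices cs i max_len a ↔
      x ∈ a ∨ ∃ L ∈ PySem.List.pyRange 0 (max_len + 1),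
        x = String.ofList (PySem.List.slice cs (some (i + 1)) (some (i + 1 + L))) := by
  unfold pvAddSlices
  generalize PySem.List.pyRange 0 (max_len + 1) = l
  induction l generalizing a with
  | nil => simp
  | cons L rest ih =>
    simp only [List.foldl_cons, ih, PySem.Set.mem_add, List.mem_cons]
    constructor
    · rintro (((h | h) | ⟨M, hM, h⟩))
      · exact Or.inl h
      · exact Or.inr ⟨L, Or.inl rfl, h⟩
      · exact Or.inr ⟨M, Or.inr hM, h⟩
    · rintro (h | ⟨M, (rfl | hM), h⟩)
      · exact Or.inl (Or.inl h)
      · exact Or.inl (Or.inr h)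
      · exact Or.inr ⟨M, hM, h⟩

-- membership in the candidate set
lemma mem_pvCands (cs : List Char) (max_len : Int) (x : String) :
    x ∈ pvCands cs max_len ↔
      ∃ p ∈ PySem.List.enumerate cs 0, (p.2 == '#' || p.2 == '$') = true ∧
        ∃ L ∈ PySem.List.pyRange 0 (max_len + 1),
          x = String.ofList (PySem.List.slice cs (some (p.1 + 1)) (some (p.1 + 1 + L))) := by
  unfold pvCands
  generalize PySem.List.enumerate cs 0 = l
  have : ∀ (l : List (Int × Char)) (a : PySem.Set String),
      x ∈ l.foldl (fun a p => if p.2 == '#' || p.2 == '$' then pvAddSlices cs p.1 max_len a else a) a ↔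
        x ∈ a ∨ ∃ p ∈ l, (p.2 == '#' || p.2 == '$') = true ∧
          ∃ L ∈ PySem.List.pyRange 0 (max_len + 1),
            x = String.ofList (PySem.List.slice cs (some (p.1 + 1)) (some (p.1 + 1 + L))) := by
    intro l
    induction l with
    | nil => simp
    | cons p rest ih =>
      intro a
      simp only [List.foldl_cons, List.mem_cons]
      by_cases hp : (p.2 == '#' || p.2 == '$') = true
      · rw [if_pos hp, ih, mem_pvAddSlices]
        constructor
        · rintro ((h | ⟨L, hL, h⟩) | ⟨q, hq, h⟩)
          · exact Or.inl h
          · exact Or.inr ⟨p, Or.inl rfl, hp, L, hL, h⟩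
          · exact Or.inr ⟨q, Or.inr hq, h⟩
        · rintro (h | ⟨q, (rfl | hq), hc, hrest⟩)
          · exact Or.inl (Or.inl h)
          · exact Or.inl (Or.inr hrest)
          · exact Or.inr ⟨q, hq, hc, hrest⟩
      · rw [if_neg hp, ih]
        constructor
        · rintro (h | ⟨q, hq, h⟩)
          · exact Or.inl h
          · exact Or.inr ⟨q, Or.inr hq, h⟩
        · rintro (h | ⟨q, (rfl | hq), hc, hrest⟩)
          · exact Or.inl h
          · exact absurd hc hp
          · exact Or.inr ⟨q, hq, hc, hrest⟩
  rw [this l PySem.Set.empty]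
  simp [PySem.Set.empty]

-- a marked substring is exactly a marker position followed by a prefix
lemma isIn_marker_iff (cs s : List Char) (c : Char) :
    PySem.Chars.isIn (c :: s) cs = true ↔
      ∃ j : Nat, cs[j]? = some c ∧ s <+: cs.drop (j + 1) := by
  rw [← PySem.Chars.exists_prefix_drop_iff_isIn]
  constructor
  · rintro ⟨j, hpre⟩
    rcases List.cons_prefix_iff.1 hpre with ⟨l', hdrop, hp⟩
    refine ⟨j, ?_, ?_⟩
    · rw [← List.head?_drop, hdrop]; rfl
    · rw [← List.tail_drop, hdrop]; exact hp
  · rintro ⟨j, hj, hp⟩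
    refine ⟨j, ?_⟩
    have hhead : (cs.drop j).head? = some c := by rw [List.head?_drop]; exact hj
    obtain ⟨t, ht⟩ : ∃ t, cs.drop j = c :: t := by
      cases hd : cs.drop j with
      | nil => rw [hd] at hhead; simp at hhead
      | cons a t =>
        rw [hd] at hhead
        simp only [List.head?_cons, Option.some.injEq] at hhead
        exact ⟨t, by rw [hhead]⟩
    rw [List.cons_prefix_iff]
    refine ⟨t, ht, ?_⟩
    have htt : t = (cs.drop j).tail := by rw [ht]; rfl
    rw [htt, List.tail_drop]
    exact hp

-- the per-coin conditions of the two programs agree for every coin short enough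
lemma cond_eq (cs : List Char) (s : String) (max_len : Int)
    (hlen : (s.toList.length : Int) ≤ max_len) :
    PySem.Set.contains (pvCands cs max_len) s =
      (PySem.Chars.isIn ('#' :: s.toList) cs || PySem.Chars.isIn ('$' :: s.toList) cs) := by
  rw [Bool.eq_iff_iff, PySem.Set.contains_iff, mem_pvCands, Bool.or_eq_true,
      isIn_marker_iff, isIn_marker_iff]
  constructor
  · rintro ⟨p, hp, hc, L, hL, hx⟩
    rcases (PySem.List.mem_enumerate_iff cs 0 p).1 hp with ⟨k, hk, rfl⟩
    rcases PySem.List.mem_pyRange_one.1 hL with ⟨hL0, _⟩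
    simp only [zero_add] at hx hc ⊢
    have hslice : PySem.List.slice cs (some ((k : Int) + 1)) (some ((k : Int) + 1 + L)) =
        (cs.drop (k + 1)).take L.toNat := by
      rw [PySem.List.slice_toNat cs (by omega) (by omega)]
      congr 1; omega
    have hpre : s.toList <+: cs.drop (k + 1) := by
      have : s.toList = (cs.drop (k + 1)).take L.toNat := by
        rw [hx, hslice]; simp
      rw [this]; exact List.take_prefix _ _
    have hget : cs[k]? = some cs[k] := List.getElem?_eq_getElem hk
    simp only [Bool.or_eq_true] at hc
    rcases hc with h | h
    · exact Or.inl ⟨k, by rw [hget, beq_iff_eq.1 h], hpre⟩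
    · exact Or.inr ⟨k, by rw [hget, beq_iff_eq.1 h], hpre⟩
  · intro h
    have : ∀ (c : Char), (c == '#' || c == '$') = true →
        (∃ j : Nat, cs[j]? = some c ∧ s.toList <+: cs.drop (j + 1)) →
        ∃ p ∈ PySem.List.enumerate cs 0, (p.2 == '#' || p.2 == '$') = true ∧
          ∃ L ∈ PySem.List.pyRange 0 (max_len + 1),
            s = String.ofList (PySem.List.slice cs (some (p.1 + 1)) (some (p.1 + 1 + L))) := by
      rintro c hc ⟨j, hj, hpre⟩
      have hjlt : j < cs.length := by
        by_contra hge
        rw [List.getElem?_eq_none (by omega)] at hj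
        simp at hj
      have hcj : cs[j] = c := by
        have := List.getElem?_eq_getElem hjlt
        rw [this] at hj; exact Option.some.inj hj
      refine ⟨((j : Int), cs[j]), (PySem.List.mem_enumerate_iff cs 0 _).2 ⟨j, hjlt, by simp⟩,
        by rw [hcj]; exact hc, (s.toList.length : Int), PySem.List.mem_pyRange_one.2 ⟨by omega, by omega⟩, ?_⟩
      have hslice : PySem.List.slice cs (some ((j : Int) + 1)) (some ((j : Int) + 1 + (s.toList.length : Int))) =
          (cs.drop (j + 1)).take s.toList.length := by
        rw [PySem.List.slice_toNat cs (by omega) (by omega)]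
        congr 1; omega
      rw [hslice, ← List.prefix_iff_eq_take.1 hpre]
      simp
    rcases h with ⟨j, hj, hpre⟩ | ⟨j, hj, hpre⟩
    · exact this '#' (by simp) ⟨j, hj, hpre⟩
    · exact this '$' (by simp) ⟨j, hj, hpre⟩

-- the two scan loops agree when the conditions agree pointwise
lemma loop_eq (ig : List String) (lower : String) (cands : PySem.Set String) (bc : List String)
    (hcond : ∀ s ∈ bc, PySem.Set.contains cands s =
      (PySem.Str.isIn (String.ofList ('#' :: s.toList)) lower
        || PySem.Str.isIn (String.ofList ('$' :: s.toList)) lower)) :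
    pvLoopA ig lower bc = pvLoopB (PySem.Set.ofList ig) cands bc := by
  induction bc with
  | nil => rfl
  | cons s rest ih =>
    have hig : (PySem.Set.ofList ig).contains s = ig.contains s := by
      rw [Bool.eq_iff_iff, PySem.Set.contains_iff, PySem.Set.mem_ofList]
      exact ⟨fun h => List.elem_eq_true_of_mem h, fun h => List.mem_of_elem_eq_true h⟩
    have hc := hcond s (List.mem_cons_self ..)
    unfold pvLoopA pvLoopB
    rw [hig, hc]
    split_ifs with h
    · rfl
    · exact ih (fun t ht => hcond t (List.mem_cons_of_mem _ ht))

-- ===== VERDICT (by name: the statement is the Claim_ definition above) =====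
theorem get_coin_name_in_text_spec : Claim_equal_get_coin_name_in_text := by
  intro status_text ignored_coins binance_coins _
  unfold Spec_get_coin_name_in_text get_coin_name_in_text get_coin_name_in_text_alt
  apply loop_eq
  intro s hs
  have hlen : (s.toList.length : Int) ≤ pvMaxLen binance_coins := by
    have := len_le_pvMaxLen binance_coins s hs
    rwa [PySem.Str.len_eq] at this
  rw [cond_eq _ _ _ hlen]
  rw [PySem.Str.isIn_eq, PySem.Str.isIn_eq]
  simp
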